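-- pv_equiv track=rewrite | github.com/DiscoveryPiscine42Bangkok2025/discovery-piscine-coding-with-python-Chinjuku | miniproject/ex00/checkmate.py | chess_position
-- ===== SOURCE A (Python) =====
-- def chess_position(table):
--     """
--     x = cols, y = rows
--     """
--     rows = table.split("\n")
--     king, bishop, pawn, queen, rook = [], [], [], [], []
--     y=1
--     for cols in rows:
--         x=1
--         for char in cols:
--             if char == "K":
--                 king = [x, y]
--             if char == "B":
--                 bishop = [x, y]
--             if char == "P":
--                 pawn = [x, y]
--             if char == "Q":
--                 queen = [x, y]
--             if char == "R":
--                 rook = [x, y]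
--             x+=1
--         y+=1
--     return [king, bishop, pawn, queen, rook]
-- ===== SOURCE B (Python) =====
-- def _last_in_row(row, sym):
--     # 1-based index of the last occurrence of sym in row, or 0 if absent
--     for x in range(len(row), 0, -1):
--         if row[x - 1] == sym:
--             return x
--     return 0
--
--
-- def chess_position(table):
--     rows = table.split("\n")
--     result = []
--     for sym in "KBPQR":
--         pos = []
--         for y in range(len(rows), 0, -1):
--             x = _last_in_row(rows[y - 1], sym)
--             if x:
--                 pos = [x, y]
--                 break
--         result.append(pos)
--     return result
-- ===== Notes on version B (the rewrite author's own statement) =====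
-- stated objective: alternative
-- what changed: Instead of one nested forward scan updating five accumulators, B searches per piece symbol: for each of K,B,P,Q,R it walks the rows backwards and scans each row from the right, so the first hit found is the last reading-order occurrence and the search stops there.
import Mathlib
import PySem

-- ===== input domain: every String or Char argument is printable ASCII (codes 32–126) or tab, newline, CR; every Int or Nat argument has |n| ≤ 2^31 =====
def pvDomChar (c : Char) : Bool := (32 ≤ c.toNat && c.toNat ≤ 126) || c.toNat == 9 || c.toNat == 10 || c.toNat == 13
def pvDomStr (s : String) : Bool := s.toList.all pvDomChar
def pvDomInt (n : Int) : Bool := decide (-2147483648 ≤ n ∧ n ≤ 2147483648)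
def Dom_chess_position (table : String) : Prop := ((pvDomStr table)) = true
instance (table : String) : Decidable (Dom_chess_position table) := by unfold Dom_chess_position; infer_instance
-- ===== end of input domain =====

-- B searches each piece symbol independently, rows backwards and each row from the right,
-- stopping at the first hit (= last reading-order occurrence); alternative decomposition, not claimed faster.

-- ===== PORT A =====
-- state: (king, bishop, pawn, queen, rook, x/y counter)
def pvStateA := List Int × List Int × List Int × List Int × List Int

-- inner loop: for char in cols (x is the running column counter)
def pvCharStep (y : Int) (st : pvStateA × Int) (c : Char) : pvStateA × Int :=
  let ((k, b, p, q, r), x) := st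
  let k := if c = 'K' then [x, y] else k
  let b := if c = 'B' then [x, y] else b
  let p := if c = 'P' then [x, y] else p
  let q := if c = 'Q' then [x, y] else q
  let r := if c = 'R' then [x, y] else r
  ((k, b, p, q, r), x + 1)

-- outer loop: for cols in rows (y is the running row counter)
def pvRowStep (st : pvStateA × Int) (row : List Char) : pvStateA × Int :=
  let (s, y) := st
  ((List.foldl (pvCharStep y) (s, 1) row).1, y + 1)

def chess_position (table : String) : List (List Int) :=
  let rows := (PySem.Str.split? table "\n").getD []
  let ((k, b, p, q, r), _) :=
    List.foldl pvRowStep (([], [], [], [], []), 1) (rows.map String.toList)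
  [k, b, p, q, r]

-- ===== PORT B =====
-- 1-based index of the last occurrence of sym in row, or 0 if absent (reverse scan, later chars first)
def pvLastInRow (row : List Char) (sym : Char) : Nat :=
  match row with
  | [] => 0
  | c :: t =>
    if pvLastInRow t sym ≠ 0 then pvLastInRow t sym + 1
    else if c = sym then 1 else 0

-- for y in range(len(rows), 0, -1): walk the reversed row list, y counting down
def pvSearchRows (revRows : List (List Char)) (y : Int) (sym : Char) : List Int :=
  match revRows with
  | [] => []
  | r :: t =>
    if pvLastInRow r sym ≠ 0 then [(pvLastInRow r sym : Int), y]
    else pvSearchRows t (y - 1) sym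

def chess_position_alt (table : String) : List (List Int) :=
  let rows := ((PySem.Str.split? table "\n").getD []).map String.toList
  "KBPQR".toList.map (fun sym => pvSearchRows rows.reverse (rows.length : Int) sym)

-- ===== PRECONDITION & SPEC =====
def Spec_chess_position (table : String) (out : List (List Int)) : Prop := out = chess_position_alt table
instance (table : String) (out : List (List Int)) : Decidable (Spec_chess_position table out) := by unfold Spec_chess_position; infer_instance

-- ===== CLAIM (what is proved, stated in full; the proofs are below) =====
def Claim_equal_chess_position : Prop := ∀ (table : String), Dom_chess_position table → Spec_chess_position table (chess_position table)

-- ===== LEMMAS AND PROOFS =====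

-- single-symbol version of A's inner char loop
def pvARow (sym : Char) (y : Int) (x : Int) (cur : List Int) (row : List Char) : List Int :=
  match row with
  | [] => cur
  | c :: t => pvARow sym y (x + 1) (if c = sym then [x, y] else cur) t

-- single-symbol version of A's outer row loop
def pvAOuter (sym : Char) (y : Int) (cur : List Int) (rows : List (List Char)) : List Int :=
  match rows with
  | [] => cur
  | r :: t => pvAOuter sym (y + 1) (pvARow sym y 1 cur r) t

-- last reading-order occurrence as (1-based column, 1-based row), last row wins
def pvG (sym : Char) (rows : List (List Char)) : Option (Nat × Nat) :=
  match rows with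
  | [] => none
  | r :: t =>
    match pvG sym t with
    | some (x, yr) => some (x, yr + 1)
    | none => if pvLastInRow r sym ≠ 0 then some (pvLastInRow r sym, 1) else none

theorem pvARow_eq (sym : Char) (y : Int) :
    ∀ (row : List Char) (x : Int) (cur : List Int),
      pvARow sym y x cur row =
        if pvLastInRow row sym ≠ 0 then [x + (pvLastInRow row sym : Int) - 1, y] else cur := by
  intro row
  induction row with
  | nil => intro x cur; simp [pvARow, pvLastInRow]
  | cons c t ih =>
    intro x cur
    simp only [pvARow, pvLastInRow, ih]
    by_cases hL : pvLastInRow t sym = 0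
    · by_cases hc : c = sym <;> simp [hL, hc]
    · have h2 : (x + 1 + (pvLastInRow t sym : Int) - 1) =
          x + ((pvLastInRow t sym + 1 : Nat) : Int) - 1 := by push_cast; ring
      simp [hL, h2]

theorem pvAOuter_eq (sym : Char) :
    ∀ (rows : List (List Char)) (y : Int) (cur : List Int),
      pvAOuter sym y cur rows =
        match pvG sym rows with
        | some (x, yr) => [(x : Int), y + (yr : Int) - 1]
        | none => cur := by
  intro rows
  induction rows with
  | nil => intro y cur; simp [pvAOuter, pvG]
  | cons r t ih =>
    intro y cur
    simp only [pvAOuter, pvG, ih, pvARow_eq]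
    cases hG : pvG sym t with
    | some p =>
      obtain ⟨x, yr⟩ := p
      simp only
      congr 1
      push_cast
      ring_nf
    | none =>
      by_cases hL : pvLastInRow r sym = 0
      · simp [hL]
      · simp only [ne_eq, hL, not_false_eq_true, if_pos]
        simp

theorem pvG_append_singleton (sym : Char) (r : List Char) :
    ∀ (l : List (List Char)),
      pvG sym (l ++ [r]) =
        if pvLastInRow r sym ≠ 0 then some (pvLastInRow r sym, l.length + 1) else pvG sym l := by
  intro l
  induction l with
  | nil => simp [pvG]
  | cons a t ih =>
    simp only [List.cons_append, pvG, ih]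
    by_cases hL : pvLastInRow r sym = 0
    · simp [hL]
    · simp [hL]

theorem pvSearchRows_eq (sym : Char) :
    ∀ (rev : List (List Char)) (y : Int),
      pvSearchRows rev y sym =
        match pvG sym rev.reverse with
        | some (x, yr) => [(x : Int), y - (rev.length : Int) + (yr : Int)]
        | none => [] := by
  intro rev
  induction rev with
  | nil => intro y; simp [pvSearchRows, pvG]
  | cons r t ih =>
    intro y
    simp only [pvSearchRows, List.reverse_cons, pvG_append_singleton, ih]
    by_cases hL : pvLastInRow r sym = 0
    · simp only [ne_eq, hL, not_true_eq_false, if_false]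
      cases hG : pvG sym t.reverse with
      | some p =>
        obtain ⟨x, yr⟩ := p
        simp only [List.length_cons]
        have h2 : (y - 1 - (t.length : Int) + (yr : Int)) =
            y - ((t.length + 1 : Nat) : Int) + (yr : Int) := by push_cast; ring
        simp [h2]
      | none => simp
    · simp only [ne_eq, hL, not_false_eq_true, if_true, List.length_cons]
      simp

-- B's per-symbol search in terms of pvG
theorem pvB_eq (sym : Char) (rows : List (List Char)) :
    pvSearchRows rows.reverse (rows.length : Int) sym =
      match pvG sym rows with
      | some (x, yr) => [(x : Int), (yr : Int)]
      | none => [] := by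
  rw [pvSearchRows_eq]
  cases hG : pvG sym rows with
  | some p =>
    obtain ⟨x, yr⟩ := p
    simp only [List.reverse_reverse, List.length_reverse, hG]
    have h2 : ((rows.length : Int) - rows.length + (yr : Int)) = (yr : Int) := by ring
    simp only [h2]
  | none => simp [hG]

-- A's tuple fold decomposes into five independent single-symbol folds
theorem pvCharFold_eq (y : Int) :
    ∀ (row : List Char) (k b p q r : List Int) (x : Int),
      List.foldl (pvCharStep y) ((k, b, p, q, r), x) row =
        ((pvARow 'K' y x k row, pvARow 'B' y x b row, pvARow 'P' y x p row,
          pvARow 'Q' y x q row, pvARow 'R' y x r row), x + row.length) := by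
  intro row
  induction row with
  | nil => intro k b p q r x; simp [pvARow]; rfl
  | cons c t ih =>
    intro k b p q r x
    simp only [List.foldl_cons, pvCharStep, ih, pvARow, List.length_cons]
    congr 1
    push_cast
    ring

theorem pvRowFold_eq :
    ∀ (rows : List (List Char)) (k b p q r : List Int) (y : Int),
      List.foldl pvRowStep ((k, b, p, q, r), y) rows =
        ((pvAOuter 'K' y k rows, pvAOuter 'B' y b rows, pvAOuter 'P' y p rows,
          pvAOuter 'Q' y q rows, pvAOuter 'R' y r rows), y + rows.length) := by
  intro rows
  induction rows with
  | nil => intro k b p q r y; simp [pvAOuter]; rfl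
  | cons row t ih =>
    intro k b p q r y
    simp only [List.foldl_cons, pvRowStep, pvCharFold_eq, ih, pvAOuter, List.length_cons]
    congr 1
    push_cast
    ring

-- ===== VERDICT (by name: the statement is the Claim_ definition above) =====
theorem chess_position_spec : Claim_equal_chess_position := by
  intro table _
  unfold Spec_chess_position chess_position chess_position_alt
  simp only [pvRowFold_eq]
  have h : ∀ sym rows, pvAOuter sym 1 [] rows = pvSearchRows rows.reverse (rows.length : Int) sym := by
    intro sym rows
    rw [pvAOuter_eq, pvB_eq]
    cases pvG sym rows with
    | some p =>
      obtain ⟨x, yr⟩ := p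
      have h2 : ((1 : Int) + (yr : Int) - 1) = (yr : Int) := by ring
      simp [h2]
    | none => rfl
  simp only [h]
  rfl
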